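-- pv_equiv track=rewrite | github.com/schmitzian87/BirthData | app.py | _match_logical_fields
-- ===== SOURCE A (Python) =====
-- def _normalize_colname(name: str) -> str:
--     return str(name).strip().lower().replace(" ", "_")
--
-- def _canonical_key(name: str) -> str:
--     # Remove non-alphanumerics to support flexible matching (underscores, dashes, etc.)
--     s = _normalize_colname(name)
--     return "".join(ch for ch in s if ch.isalnum())
--
-- def _match_logical_fields(columns_norm):
--     """
--     Returns a dict mapping logical field -> actual normalized column name in df.
--     Performs:
--       1) Exact normalized match
--       2) Canonical (alnum-only) match
--       3) Known aliases (without assuming extra columns)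
--     """
--     logical_required = [
--         "state_of_residence",
--         "month",
--         "month_code",
--         "year_code",
--         "sex_of_infant",
--         "births",
--     ]
--
--     cols_set = set(columns_norm)
--     cols_canon_map = {c: _canonical_key(c) for c in columns_norm}
--     canon_to_cols = {}
--     for c, ck in cols_canon_map.items():
--         canon_to_cols.setdefault(ck, []).append(c)
--
--     # Light aliasing only for the required logical fields
--     alias_candidates = {
--         "state_of_residence": ["state_of_residence", "state", "state_residence", "residence_state"],
--         "month": ["month", "month_of_birth", "birth_month"],
--         "month_code": ["month_code", "monthcode", "month_cd", "month_cd_code", "monthnumber", "month_num", "monthnumbercode"],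
--         "year_code": ["year_code", "yearcode", "year_cd", "year"],
--         "sex_of_infant": ["sex_of_infant", "sex", "infant_sex", "sex_of_child"],
--         "births": ["births", "birth", "birth_count", "count", "number_of_births", "num_births"],
--     }
--
--     matched = {}
--
--     for logical in logical_required:
--         # 1) Exact normalized match
--         if logical in cols_set:
--             matched[logical] = logical
--             continue
--
--         # 2) Canonical match (e.g., "State of Residence" -> "state_of_residence")
--         target_canon = _canonical_key(logical)
--         if target_canon in canon_to_cols and len(canon_to_cols[target_canon]) >= 1:
--             # If multiple candidates collide, pick the shortest (often the cleanest)
--             candidates = sorted(canon_to_cols[target_canon], key=lambda x: (len(x), x))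
--             matched[logical] = candidates[0]
--             continue
--
--         # 3) Alias-based match (normalized then canonical)
--         found = None
--         for alias in alias_candidates.get(logical, []):
--             alias_norm = _normalize_colname(alias)
--             if alias_norm in cols_set:
--                 found = alias_norm
--                 break
--             alias_canon = _canonical_key(alias_norm)
--             if alias_canon in canon_to_cols:
--                 candidates = sorted(canon_to_cols[alias_canon], key=lambda x: (len(x), x))
--                 found = candidates[0]
--                 break
--         if found is not None:
--             matched[logical] = found
--
--     return matched
-- ===== SOURCE B (Python) =====
-- # B: single column-major pass. Instead of A's three-stage per-field cascade over
-- # precomputed indexes, B compiles each logical field into a priority-ordered pattern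
-- # list once, then scans the columns ONCE, keeping per field the minimal
-- # (priority, len, name) candidate; the staged precedence and (len, x) tie-break fall
-- # out of the tuple order.
-- def _normalize_colname(name: str) -> str:
--     return str(name).strip().lower().replace(" ", "_")
--
-- def _canonical_key(name: str) -> str:
--     s = _normalize_colname(name)
--     return "".join(ch for ch in s if ch.isalnum())
--
-- _LOGICAL_REQUIRED = [
--     "state_of_residence",
--     "month",
--     "month_code",
--     "year_code",
--     "sex_of_infant",
--     "births",
-- ]
--
-- _ALIAS_CANDIDATES = {
--     "state_of_residence": ["state_of_residence", "state", "state_residence", "residence_state"],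
--     "month": ["month", "month_of_birth", "birth_month"],
--     "month_code": ["month_code", "monthcode", "month_cd", "month_cd_code", "monthnumber", "month_num", "monthnumbercode"],
--     "year_code": ["year_code", "yearcode", "year_cd", "year"],
--     "sex_of_infant": ["sex_of_infant", "sex", "infant_sex", "sex_of_child"],
--     "births": ["births", "birth", "birth_count", "count", "number_of_births", "num_births"],
-- }
--
-- def _pats(logical):
--     # priority-ordered (priority, is_exact, pattern) list for one logical field
--     pats = [(0, True, logical), (1, False, _canonical_key(logical))]
--     p = 2
--     for alias in _ALIAS_CANDIDATES.get(logical, []):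
--         a = _normalize_colname(alias)
--         pats = pats + [(p, True, a), (p + 1, False, _canonical_key(a))]
--         p = p + 2
--     return pats
--
-- def _first_hit(col, col_canon, pats):
--     # best (lowest-priority) way this one column can serve the field, or None
--     for prio, is_exact, pat in pats:
--         if is_exact:
--             if col == pat:
--                 return (prio, len(pat), pat)
--         elif col_canon == pat:
--             return (prio, len(col), col)
--     return None
--
-- def _better(cur, cand):
--     if cand is None:
--         return cur
--     if cur is None or cand < cur:
--         return cand
--     return cur
--
-- def _match_logical_fields(columns_norm):
--     state = [(logical, _pats(logical), None) for logical in _LOGICAL_REQUIRED]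
--     for col in columns_norm:
--         ck = _canonical_key(col)
--         state = [(l, pats, _better(cur, _first_hit(col, ck, pats))) for (l, pats, cur) in state]
--     return {l: cur[2] for (l, _, cur) in state if cur is not None}
-- ===== Notes on version B (the rewrite author's own statement) =====
-- stated objective: alternative
-- what changed: B inverts the traversal: instead of A's per-field three-stage cascade (exact set lookup, then a prebuilt canonical->columns index with a bucket sort, then an alias loop), B compiles each logical field once into a priority-ordered pattern list and makes a single column-major pass over columns_norm, keeping per field the minimal (priority, len, name) tuple; the stage precedence and (len, x) tie-break arise from the tuple order.
import Mathlib
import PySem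

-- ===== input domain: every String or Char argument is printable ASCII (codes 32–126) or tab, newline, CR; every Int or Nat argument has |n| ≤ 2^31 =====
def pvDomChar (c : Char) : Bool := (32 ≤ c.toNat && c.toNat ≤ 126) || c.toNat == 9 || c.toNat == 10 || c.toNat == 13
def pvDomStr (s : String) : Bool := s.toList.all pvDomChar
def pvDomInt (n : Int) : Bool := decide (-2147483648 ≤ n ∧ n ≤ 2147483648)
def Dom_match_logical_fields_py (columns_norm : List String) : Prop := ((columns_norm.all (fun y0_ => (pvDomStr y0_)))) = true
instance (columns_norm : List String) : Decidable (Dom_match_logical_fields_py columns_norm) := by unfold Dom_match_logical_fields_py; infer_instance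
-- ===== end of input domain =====

-- B replaces A's per-field staged cascade over precomputed indexes by a single
-- column-major pass keeping, per logical field, the minimal (priority, len, name)
-- candidate over a priority-ordered pattern list (objective: alternative).

-- helpers shared by both Pythons (_normalize_colname / _canonical_key are defined identically in Source A and Source B)
def pvNormalize (name : String) : String :=
  PySem.Str.replace (PySem.Str.lower (PySem.Str.strip name)) " " "_"

-- "".join(ch for ch in s if ch.isalnum()) is exactly a filter over the characters
def pvCanon (name : String) : String :=
  String.ofList ((pvNormalize name).toList.filter PySem.Chars.isalnum)

def pvLogicalRequired : List String :=
  ["state_of_residence", "month", "month_code", "year_code", "sex_of_infant", "births"]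

def pvAliasCandidates : PySem.Dict String (List String) :=
  PySem.Dict.ofList
    [ ("state_of_residence", ["state_of_residence", "state", "state_residence", "residence_state"])
    , ("month", ["month", "month_of_birth", "birth_month"])
    , ("month_code", ["month_code", "monthcode", "month_cd", "month_cd_code", "monthnumber", "month_num", "monthnumbercode"])
    , ("year_code", ["year_code", "yearcode", "year_cd", "year"])
    , ("sex_of_infant", ["sex_of_infant", "sex", "infant_sex", "sex_of_child"])
    , ("births", ["births", "birth", "birth_count", "count", "number_of_births", "num_births"]) ]

-- ===== PORT A =====
-- cols_canon_map = {c: _canonical_key(c) for c in columns_norm}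
def pvColsCanonMap (columns_norm : List String) : PySem.Dict String String :=
  columns_norm.foldl (fun d c => d.insert c (pvCanon c)) PySem.Dict.empty

-- canon_to_cols.setdefault(ck, []).append(c)  is  d[ck] = d.get(ck, []) + [c]  =  Dict.modify
def pvCanonToCols (columns_norm : List String) : PySem.Dict String (List String) :=
  (pvColsCanonMap columns_norm).items.foldl
    (fun d p => d.modify p.2 [] (fun l => l ++ [p.1])) PySem.Dict.empty

-- sorted(candidates, key=lambda x: (len(x), x))[0]; every bucket of canon_to_cols is nonempty,
-- so the Python index [0] never raises and the headD default is never used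
def pvPickSortedA (cands : List String) : String :=
  (PySem.List.sorted2 cands (fun x => PySem.Str.len x) (fun x => x)).headD ""

-- the stage-3 alias loop of A (for-loop with break, then `if found is not None`)
def pvAliasLoopA (colsSet : PySem.Set String) (canonToCols : PySem.Dict String (List String)) :
    List String → Option String
  | [] => none
  | alias_ :: rest =>
    if colsSet.contains (pvNormalize alias_) then some (pvNormalize alias_)
    else if canonToCols.contains (pvCanon (pvNormalize alias_)) then
      some (pvPickSortedA (canonToCols.getD (pvCanon (pvNormalize alias_)) []))
    else pvAliasLoopA colsSet canonToCols rest

def match_logical_fields_py (columns_norm : List String) : List (String × String) :=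
  (pvLogicalRequired.foldl (fun m logical =>
      if (PySem.Set.ofList columns_norm).contains logical then
        m.insert logical logical
      else if (pvCanonToCols columns_norm).contains (pvCanon logical) ∧
              1 ≤ ((pvCanonToCols columns_norm).getD (pvCanon logical) []).length then
        m.insert logical (pvPickSortedA ((pvCanonToCols columns_norm).getD (pvCanon logical) []))
      else
        match pvAliasLoopA (PySem.Set.ofList columns_norm) (pvCanonToCols columns_norm)
                (pvAliasCandidates.getD logical []) with
        | some found => m.insert logical found
        | none => m)
    PySem.Dict.empty).items

-- ===== PORT B =====
-- _pats(logical): priority-ordered (priority, is_exact, pattern) list, built with a counter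
def pvPatsB (logical : String) : List (Int × Bool × String) :=
  ((pvAliasCandidates.getD logical []).foldl
    (fun (acc : Int × List (Int × Bool × String)) a =>
      (acc.1 + 2, acc.2 ++ [(acc.1, true, pvNormalize a), (acc.1 + 1, false, pvCanon (pvNormalize a))]))
    (2, [(0, true, logical), (1, false, pvCanon logical)])).2

-- _first_hit(col, col_canon, pats): the for-loop with early return
def pvFirstHit (col colCanon : String) : List (Int × Bool × String) → Option (Int × Int × String)
  | [] => none
  | (prio, isExact, pat) :: rest =>
    if isExact then
      if col == pat then some (prio, PySem.Str.len pat, pat)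
      else pvFirstHit col colCanon rest
    else if colCanon == pat then some (prio, PySem.Str.len col, col)
    else pvFirstHit col colCanon rest

-- Python tuple `<` on (int, int, str), lexicographic
def pvTripLt (t u : Int × Int × String) : Bool :=
  t.1 < u.1 || (t.1 == u.1 && (t.2.1 < u.2.1 || (t.2.1 == u.2.1 && t.2.2 < u.2.2)))

-- _better(cur, cand)
def pvBetter (cur cand : Option (Int × Int × String)) : Option (Int × Int × String) :=
  match cand with
  | none => cur
  | some t =>
    match cur with
    | none => some t
    | some u => if pvTripLt t u then some t else some u

def match_logical_fields_py_alt (columns_norm : List String) : List (String × String) :=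
  let state0 := pvLogicalRequired.map (fun l => (l, pvPatsB l, (none : Option (Int × Int × String))))
  let stateF := columns_norm.foldl
    (fun st col => st.map (fun e => (e.1, e.2.1, pvBetter e.2.2 (pvFirstHit col (pvCanon col) e.2.1)))) state0
  (stateF.foldl (fun m e =>
      match e.2.2 with
      | some t => m.insert e.1 t.2.2
      | none => m) PySem.Dict.empty).items

-- ===== PRECONDITION & SPEC =====
def Spec_match_logical_fields_py (columns_norm : List String) (out : List (String × String)) : Prop := out = match_logical_fields_py_alt columns_norm
instance (columns_norm : List String) (out : List (String × String)) : Decidable (Spec_match_logical_fields_py columns_norm out) := by unfold Spec_match_logical_fields_py; infer_instance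

-- ===== CLAIM (what is proved, stated in full; the proofs are below) =====
def Claim_equal_match_logical_fields_py : Prop := ∀ (columns_norm : List String), Dom_match_logical_fields_py columns_norm → Spec_match_logical_fields_py columns_norm (match_logical_fields_py columns_norm)

-- ===== LEMMAS AND PROOFS =====

-- the common abstraction both sides are reduced to: a cascade over (is_exact, pattern) pairs
def pvCascade (cols : List String) : List (Bool × String) → Option String
  | [] => none
  | (true, p) :: rest => if p ∈ cols then some p else pvCascade cols rest
  | (false, p) :: rest =>
    match PySem.List.min? (cols.filter (fun c => pvCanon c == p)) (fun x => toLex (PySem.Str.len x, x)) with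
    | some m => some m
    | none => pvCascade cols rest

def pvDrop (pats : List (Int × Bool × String)) : List (Bool × String) :=
  pats.map (fun t => (t.2.1, t.2.2))

def pvLexKey (x : String) : Lex (Int × String) := toLex (PySem.Str.len x, x)

def pvTripKey (t : Int × Int × String) : Lex (Int × Lex (Int × String)) :=
  toLex (t.1, toLex (t.2.1, t.2.2))

theorem pvLexKey_inj : Function.Injective pvLexKey := by
  intro a b h
  have := congrArg (fun p => (ofLex p).2) h
  simpa [pvLexKey] using this

theorem pvTripKey_inj : Function.Injective pvTripKey := by
  intro a b h
  have h1 := congrArg (fun p => (ofLex p).1) h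
  have h2 := congrArg (fun p => (ofLex (ofLex p).2).1) h
  have h3 := congrArg (fun p => (ofLex (ofLex p).2).2) h
  simp only [pvTripKey] at h1 h2 h3
  exact Prod.ext h1 (Prod.ext h2 h3)

theorem pv_contains_ofList (xs : List String) (y : String) :
    (PySem.Set.ofList xs).contains y = xs.contains y := by
  by_cases h : y ∈ xs <;>
    simp [PySem.Set.mem_ofList, h]

theorem pv_get?_colsCanonMap (l : List String) (d : PySem.Dict String String) (k : String) :
    (l.foldl (fun d c => d.insert c (pvCanon c)) d).get? k
      = if k ∈ l then some (pvCanon k) else d.get? k := by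
  induction l generalizing d with
  | nil => simp
  | cons c t ih =>
    simp only [List.foldl_cons, ih, PySem.Dict.get?_insert, List.mem_cons]
    by_cases h1 : k ∈ t <;> by_cases h2 : k = c <;> simp [h1, h2]

theorem pv_keys_colsCanonMap (l : List String) :
    (pvColsCanonMap l).keys = PySem.List.dedup l := by
  unfold pvColsCanonMap
  rw [PySem.Dict.keys_foldl_insert l (fun _ c => pvCanon c) PySem.Dict.empty]
  simp [PySem.Set.update_nil_left, PySem.List.dedup_eq_ofList, PySem.Dict.keys_empty]

theorem pv_nodup_keys_colsCanonMap (l : List String) : (pvColsCanonMap l).keys.Nodup := by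
  unfold pvColsCanonMap
  exact PySem.Dict.nodup_keys_foldl_insert l _ _ (by simp)

theorem pv_items_colsCanonMap (l : List String) :
    (pvColsCanonMap l).items = (PySem.List.dedup l).map (fun c => (c, pvCanon c)) := by
  rw [PySem.Dict.items_eq_map_keys _ (pv_nodup_keys_colsCanonMap l) "", pv_keys_colsCanonMap]
  apply List.map_congr_left
  intro c hc
  have hcl : c ∈ l := (PySem.List.mem_dedup l c).mp hc
  simp [PySem.Dict.getD_eq_get?_getD, pvColsCanonMap, pv_get?_colsCanonMap, hcl]

theorem pv_getD_canonToCols (l : List String) (k : String) :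
    (pvCanonToCols l).getD k [] = (PySem.List.dedup l).filter (fun c => pvCanon c == k) := by
  unfold pvCanonToCols
  have hswap : ∀ (items : List (String × String)) (d : PySem.Dict String (List String)),
      items.foldl (fun d p => d.modify p.2 [] (fun x => x ++ [p.1])) d
        = (items.map Prod.swap).foldl (fun d q => d.modify q.1 [] (fun x => x ++ [q.2])) d := by
    intro items d
    rw [List.foldl_map]
    apply PySem.List.foldl_congr_mem
    intro d' p _
    simp
  rw [pv_items_colsCanonMap, hswap, PySem.Dict.getD_foldl_modify_append]
  simp [List.map_map, List.filter_map, Function.comp_def]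

theorem pv_contains_canonToCols (l : List String) (k : String) :
    (pvCanonToCols l).contains k = true ↔ ∃ c ∈ l, pvCanon c = k := by
  rw [PySem.Dict.contains_iff_mem_keys]
  unfold pvCanonToCols
  rw [PySem.Dict.keys_foldl_modify_key _ (fun p => (p : String × String).2) []
        (fun _ p => fun x => x ++ [p.1]) PySem.Dict.empty]
  simp [PySem.Dict.keys_empty, PySem.Set.update_nil_left, PySem.Set.mem_ofList,
        pv_items_colsCanonMap]

theorem pv_contains_iff_filter (cols : List String) (k : String) :
    (pvCanonToCols cols).contains k = true ↔ cols.filter (fun c => pvCanon c == k) ≠ [] := by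
  rw [pv_contains_canonToCols]
  rw [Ne, List.filter_eq_nil_iff]
  simp

theorem pv_length_getD_pos (cols : List String) (k : String)
    (hc : (pvCanonToCols cols).contains k = true) :
    1 ≤ ((pvCanonToCols cols).getD k []).length := by
  obtain ⟨c, hcl, hck⟩ := (pv_contains_canonToCols cols k).mp hc
  rw [pv_getD_canonToCols]
  have : c ∈ (PySem.List.dedup cols).filter (fun c => pvCanon c == k) := by
    simp [hcl, hck]
  exact List.length_pos_of_mem this

theorem pv_lt_bool_eq (a b : String) :
    (decide (PySem.Str.len a < PySem.Str.len b)
      || (!decide (PySem.Str.len b < PySem.Str.len a) && decide (a < b)))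
      = decide (pvLexKey a < pvLexKey b) := by
  rw [Bool.eq_iff_iff]
  simp only [pvLexKey, Prod.Lex.toLex_lt_toLex, Bool.or_eq_true, Bool.and_eq_true,
    Bool.not_eq_true', decide_eq_true_eq, decide_eq_false_iff_not]
  rcases lt_trichotomy (PySem.Str.len a) (PySem.Str.len b) with h | h | h
  · constructor <;> intro _ <;> exact Or.inl h
  · constructor
    · rintro (h' | ⟨_, h2⟩)
      · exact Or.inl h'
      · exact Or.inr ⟨h, h2⟩
    · rintro (h' | ⟨_, h2⟩)
      · exact Or.inl h'
      · exact Or.inr ⟨not_lt.mpr h.le, h2⟩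
  · constructor
    · rintro (h' | ⟨hn, _⟩)
      · exact Or.inl h'
      · exact absurd h hn
    · rintro (h' | ⟨he, _⟩)
      · exact Or.inl h'
      · exact absurd he (ne_of_gt h)

theorem pv_insertBy_congr (b1 b2 : String → String → Bool) (h : ∀ a b, b1 a b = b2 a b)
    (x : String) : ∀ ys, PySem.List.insertBy b1 x ys = PySem.List.insertBy b2 x ys := by
  intro ys
  induction ys with
  | nil => rfl
  | cons y t ih => simp only [PySem.List.insertBy, h x y, ih]

theorem pv_sorted2_eq_sorted_lex (xs : List String) :
    PySem.List.sorted2 xs (fun x => PySem.Str.len x) (fun x => x)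
      = PySem.List.sorted xs pvLexKey := by
  show List.foldl _ [] xs = List.foldl _ [] xs
  apply PySem.List.foldl_congr_mem
  intro acc x _
  exact pv_insertBy_congr _ _ (fun a b => by simpa using pv_lt_bool_eq a b) x acc

-- min?(ys, key=(len,x)) = sorted(xs, key=(len,x))[0] when xs and ys have the same members
theorem pv_pick_eq_min (xs ys : List String)
    (hmem : ∀ x, x ∈ xs ↔ x ∈ ys) (hne : xs ≠ []) :
    PySem.List.min? ys pvLexKey
      = some ((PySem.List.sorted2 xs (fun x => PySem.Str.len x) (fun x => x)).headD "") := by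
  rw [pv_sorted2_eq_sorted_lex]
  have hys : ys ≠ [] := by
    cases xs with
    | nil => exact absurd rfl hne
    | cons a t =>
      intro hy
      have : a ∈ ys := (hmem a).mp List.mem_cons_self
      simp [hy] at this
  obtain ⟨m', hm'⟩ : ∃ m', PySem.List.min? ys pvLexKey = some m' := by
    cases h : PySem.List.min? ys pvLexKey with
    | none => exact absurd ((PySem.List.min?_eq_none_iff ys pvLexKey).mp h) hys
    | some m' => exact ⟨m', rfl⟩
  cases h2 : PySem.List.sorted xs pvLexKey with
  | nil => exact absurd ((PySem.List.sorted_eq_nil_iff xs pvLexKey false).mp h2) hne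
  | cons m t =>
    have h3 : ∀ y ∈ xs, pvLexKey m ≤ pvLexKey y := PySem.List.key_head_sorted_le xs pvLexKey h2
    have hm_mem : m ∈ xs := by
      have : m ∈ PySem.List.sorted xs pvLexKey false := by rw [h2]; exact List.mem_cons_self
      exact (PySem.List.mem_sorted xs pvLexKey false m).mp this
    have hm'_mem : m' ∈ ys := PySem.List.min?_mem hm'
    have h4 := PySem.List.min?_isMin hm'
    have hkey : pvLexKey m = pvLexKey m' :=
      le_antisymm (h3 m' ((hmem m').mpr hm'_mem)) (h4 m ((hmem m).mp hm_mem))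
    have heq : m = m' := pvLexKey_inj hkey
    rw [hm', heq]
    rfl

-- A-stage-2/alias canonical pick = min? over the raw filtered columns
theorem pv_min?_filter_eq (cols : List String) (p : String)
    (hc : (pvCanonToCols cols).contains p = true) :
    PySem.List.min? (cols.filter (fun c => pvCanon c == p)) pvLexKey
      = some (pvPickSortedA ((pvCanonToCols cols).getD p [])) := by
  unfold pvPickSortedA
  rw [pv_getD_canonToCols]
  apply pv_pick_eq_min
  · intro x
    simp
  · obtain ⟨c, hcl, hck⟩ := (pv_contains_canonToCols cols p).mp hc
    intro hnil
    have hco : c ∈ PySem.List.dedup cols := (PySem.List.mem_dedup cols c).mpr hcl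
    have := List.filter_eq_nil_iff.mp hnil c hco
    simp [hck] at this

theorem pv_min?_filter_none (cols : List String) (p : String)
    (hc : ¬ (pvCanonToCols cols).contains p = true) :
    PySem.List.min? (cols.filter (fun c => pvCanon c == p)) pvLexKey = none := by
  have hfil : cols.filter (fun c => pvCanon c == p) = [] := by
    by_contra hne
    exact hc ((pv_contains_iff_filter cols p).mpr hne)
  rw [hfil]
  exact (PySem.List.min?_eq_none_iff _ _).mpr rfl

-- ===== A reduced to the cascade =====

theorem pv_aliasA_cascade (cols : List String) (aliases : List String) :
    pvAliasLoopA (PySem.Set.ofList cols) (pvCanonToCols cols) aliases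
      = pvCascade cols (aliases.flatMap (fun a => [(true, pvNormalize a), (false, pvCanon (pvNormalize a))])) := by
  induction aliases with
  | nil => rfl
  | cons a rest ih =>
    simp only [List.flatMap_cons, List.cons_append, List.nil_append]
    show pvAliasLoopA _ _ (a :: rest) = pvCascade cols ((true, pvNormalize a) :: (false, pvCanon (pvNormalize a)) :: _)
    simp only [pvAliasLoopA, pvCascade, pv_contains_ofList]
    by_cases hin : pvNormalize a ∈ cols
    · simp [hin]
    · simp only [hin, if_false, List.contains_iff_mem]
      by_cases hc : (pvCanonToCols cols).contains (pvCanon (pvNormalize a)) = true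
      · simp only [if_pos hc]
        rw [show (fun x => toLex (PySem.Str.len x, x)) = pvLexKey from rfl,
            pv_min?_filter_eq cols _ hc]
      · simp only [if_neg hc]
        rw [show (fun x => toLex (PySem.Str.len x, x)) = pvLexKey from rfl,
            pv_min?_filter_none cols _ hc]
        exact ih

-- the structure of B's pattern list, with priorities forgotten
theorem pv_patsB_drop_aux (aliases : List String) :
    ∀ (p : Int) (init : List (Int × Bool × String)),
    pvDrop ((aliases.foldl
      (fun (acc : Int × List (Int × Bool × String)) a =>
        (acc.1 + 2, acc.2 ++ [(acc.1, true, pvNormalize a), (acc.1 + 1, false, pvCanon (pvNormalize a))]))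
      (p, init)).2)
      = pvDrop init ++ aliases.flatMap (fun a => [(true, pvNormalize a), (false, pvCanon (pvNormalize a))]) := by
  induction aliases with
  | nil => intro p init; simp [pvDrop]
  | cons a rest ih =>
    intro p init
    simp only [List.foldl_cons, ih, List.flatMap_cons]
    simp [pvDrop]

theorem pv_patsB_drop (logical : String) :
    pvDrop (pvPatsB logical)
      = (true, logical) :: (false, pvCanon logical)
        :: (pvAliasCandidates.getD logical []).flatMap
             (fun a => [(true, pvNormalize a), (false, pvCanon (pvNormalize a))]) := by
  unfold pvPatsB
  rw [pv_patsB_drop_aux]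
  rfl

-- A's per-field step equals the cascade over B's (dropped) pattern list
theorem pv_stepA_cascade (cols : List String) (m : PySem.Dict String String) (logical : String) :
    (if (PySem.Set.ofList cols).contains logical then
        m.insert logical logical
      else if (pvCanonToCols cols).contains (pvCanon logical) ∧
              1 ≤ ((pvCanonToCols cols).getD (pvCanon logical) []).length then
        m.insert logical (pvPickSortedA ((pvCanonToCols cols).getD (pvCanon logical) []))
      else
        match pvAliasLoopA (PySem.Set.ofList cols) (pvCanonToCols cols)
                (pvAliasCandidates.getD logical []) with
        | some found => m.insert logical found
        | none => m)
    = (match pvCascade cols (pvDrop (pvPatsB logical)) with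
       | some v => m.insert logical v
       | none => m) := by
  rw [pv_patsB_drop]
  simp only [pv_contains_ofList]
  by_cases hin : logical ∈ cols
  · simp [pvCascade, hin]
  · simp only [List.contains_iff_mem, hin, if_false]
    show _ = (match pvCascade cols ((true, logical) :: (false, pvCanon logical) :: _) with
              | some v => m.insert logical v | none => m)
    simp only [pvCascade, hin, if_false]
    by_cases hc : (pvCanonToCols cols).contains (pvCanon logical) = true
    · rw [show (fun x => toLex (PySem.Str.len x, x)) = pvLexKey from rfl,
          pv_min?_filter_eq cols _ hc]
      simp only [if_pos (And.intro hc (pv_length_getD_pos cols _ hc))]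
    · rw [show (fun x => toLex (PySem.Str.len x, x)) = pvLexKey from rfl,
          pv_min?_filter_none cols _ hc]
      simp only [if_neg (fun hand : _ ∧ _ => hc hand.1)]
      rw [pv_aliasA_cascade]

-- ===== B reduced to the cascade =====

-- pvTripLt is the lexicographic order on triples
theorem pv_tripLt_iff (t u : Int × Int × String) :
    pvTripLt t u = true ↔ pvTripKey t < pvTripKey u := by
  unfold pvTripLt pvTripKey
  simp [Prod.Lex.toLex_lt_toLex]

-- running minimum over the list of present candidates
def pvMinList (l : List (Int × Int × String)) : Option (Int × Int × String) :=
  l.foldl (fun cur t => pvBetter cur (some t)) none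

theorem pv_fold_better (f : String → Option (Int × Int × String)) :
    ∀ (cols : List String) (cur : Option (Int × Int × String)),
    cols.foldl (fun cur c => pvBetter cur (f c)) cur
      = (cols.filterMap f).foldl (fun cur t => pvBetter cur (some t)) cur := by
  intro cols
  induction cols with
  | nil => intro cur; rfl
  | cons c rest ih =>
    intro cur
    simp only [List.foldl_cons]
    cases h : f c with
    | none => rw [List.filterMap_cons_none h]; simpa [pvBetter] using ih _
    | some t => rw [List.filterMap_cons_some h]; simpa using ih _

theorem pv_minlist_aux (l : List (Int × Int × String)) :
    ∀ u, ∃ v, l.foldl (fun cur t => pvBetter cur (some t)) (some u) = some v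
      ∧ v ∈ u :: l ∧ ∀ x ∈ u :: l, pvTripKey v ≤ pvTripKey x := by
  induction l with
  | nil =>
    intro u
    refine ⟨u, rfl, List.mem_cons_self, ?_⟩
    intro x hx
    rw [List.mem_singleton] at hx
    rw [hx]
  | cons t rest ih =>
    intro u
    simp only [List.foldl_cons]
    by_cases h : pvTripLt t u = true
    · obtain ⟨v, hv, hmem, hmin⟩ := ih t
      refine ⟨v, by simpa [pvBetter, h] using hv, ?_, ?_⟩
      · rcases List.mem_cons.mp hmem with h1 | h1
        · exact List.mem_cons_of_mem _ (h1 ▸ List.mem_cons_self)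
        · exact List.mem_cons_of_mem _ (List.mem_cons_of_mem _ h1)
      · intro x hx
        rcases List.mem_cons.mp hx with h1 | h1
        · rw [h1]
          exact (hmin t List.mem_cons_self).trans ((pv_tripLt_iff t u).mp h).le
        · exact hmin x h1
    · obtain ⟨v, hv, hmem, hmin⟩ := ih u
      refine ⟨v, by simpa [pvBetter, h] using hv, ?_, ?_⟩
      · rcases List.mem_cons.mp hmem with h1 | h1
        · exact h1 ▸ List.mem_cons_self
        · exact List.mem_cons_of_mem _ (List.mem_cons_of_mem _ h1)
      · intro x hx
        rcases List.mem_cons.mp hx with h1 | h1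
        · exact hmin x (by rw [h1]; exact List.mem_cons_self)
        · rcases List.mem_cons.mp h1 with h2 | h2
          · have hut : pvTripKey u ≤ pvTripKey t :=
              not_lt.mp (fun hlt => h ((pv_tripLt_iff t u).mpr hlt))
            rw [h2]
            exact (hmin u List.mem_cons_self).trans hut
          · exact hmin x (List.mem_cons_of_mem _ h2)

theorem pv_minlist_eq_some (l : List (Int × Int × String)) (m : Int × Int × String)
    (hm : m ∈ l) (hmin : ∀ x ∈ l, pvTripKey m ≤ pvTripKey x) :
    pvMinList l = some m := by
  cases l with
  | nil => simp at hm
  | cons t rest =>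
    obtain ⟨v, hv, hmem, hvmin⟩ := pv_minlist_aux rest t
    have hfold : pvMinList (t :: rest) = some v := by
      unfold pvMinList
      simpa [pvBetter] using hv
    have h1 : pvTripKey m ≤ pvTripKey v := hmin v hmem
    have h2 : pvTripKey v ≤ pvTripKey m := hvmin m hm
    rw [hfold, pvTripKey_inj (le_antisymm h2 h1)]

theorem pv_firstHit_prio (c k : String) :
    ∀ (pats : List (Int × Bool × String)) (t : Int × Int × String),
    pvFirstHit c k pats = some t → t.1 ∈ pats.map (fun q => q.1) := by
  intro pats
  induction pats with
  | nil => intro t h; simp [pvFirstHit] at h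
  | cons q rest ih =>
    intro t h
    obtain ⟨prio, isExact, pat⟩ := q
    simp only [pvFirstHit] at h
    by_cases he : isExact = true
    · subst he
      by_cases hc : (c == pat) = true
      · simp only [hc, if_true, if_true] at h
        cases h
        simp
      · simp only [hc, if_true] at h
        rw [if_neg (by simp_all)] at h
        exact List.mem_cons_of_mem _ (ih t h)
    · have he' : isExact = false := by simpa using he
      subst he'
      simp only [Bool.false_eq_true, if_false] at h
      by_cases hc : (k == pat) = true
      · simp only [hc, if_true] at h
        cases h
        simp
      · rw [if_neg (by simp_all)] at h
        exact List.mem_cons_of_mem _ (ih t h)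

-- the heart: minimum of per-column first hits = the cascade, given increasing priorities
set_option maxHeartbeats 4000000 in
theorem pv_min_cascade (pats : List (Int × Bool × String)) :
    ∀ (cols : List String),
    (pats.map (fun q => q.1)).Pairwise (· < ·) →
    (pvMinList (cols.filterMap (fun c => pvFirstHit c (pvCanon c) pats))).map (fun t => t.2.2)
      = pvCascade cols (pvDrop pats) := by
  induction pats with
  | nil =>
    intro cols _
    have : cols.filterMap (fun c => pvFirstHit c (pvCanon c) ([] : List (Int × Bool × String))) = [] := by
      simp [pvFirstHit]
    rw [this]
    rfl
  | cons q rest ih =>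
    intro cols hp
    obtain ⟨prio, isExact, pat⟩ := q
    rw [List.map_cons] at hp
    obtain ⟨hlt, hrest⟩ := List.pairwise_cons.mp hp
    have hgt : ∀ c, ∀ t, pvFirstHit c (pvCanon c) rest = some t → prio < t.1 := by
      intro c t ht
      exact hlt t.1 (pv_firstHit_prio c (pvCanon c) rest t ht)
    by_cases he : isExact = true
    · subst he
      show _ = pvCascade cols ((true, pat) :: pvDrop rest)
      by_cases hin : pat ∈ cols
      · have hmin : pvMinList (cols.filterMap (fun c => pvFirstHit c (pvCanon c) ((prio, true, pat) :: rest)))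
            = some (prio, PySem.Str.len pat, pat) := by
          apply pv_minlist_eq_some
          · apply List.mem_filterMap.mpr
            exact ⟨pat, hin, by simp [pvFirstHit]⟩
          · intro x hx
            obtain ⟨c, _, hc⟩ := List.mem_filterMap.mp hx
            simp only [pvFirstHit, if_true] at hc
            by_cases hcp : (c == pat) = true
            · rw [if_pos hcp] at hc
              cases hc
              exact le_refl _
            · rw [if_neg (by simp_all)] at hc
              have := hgt c x hc
              exact le_of_lt ((pv_tripLt_iff _ _).mp (by
                unfold pvTripLt
                simp [this]))
          -- minimality: exact hits at the head priority, everything else strictly later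
        rw [hmin]
        simp [pvCascade, hin]
      · have hcongr : cols.filterMap (fun c => pvFirstHit c (pvCanon c) ((prio, true, pat) :: rest))
            = cols.filterMap (fun c => pvFirstHit c (pvCanon c) rest) := by
          apply List.filterMap_congr
          intro c hc
          have : (c == pat) = false := by
            simp only [beq_eq_false_iff_ne, ne_eq]
            rintro rfl
            exact hin hc
          simp [pvFirstHit, this]
        rw [hcongr]
        have : pvCascade cols ((true, pat) :: pvDrop rest) = pvCascade cols (pvDrop rest) := by
          simp [pvCascade, hin]
        rw [this]
        exact ih cols hrest
    · have he' : isExact = false := by simpa using he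
      subst he'
      show _ = pvCascade cols ((false, pat) :: pvDrop rest)
      by_cases hex : ∃ c ∈ cols, (pvCanon c == pat) = true
      · have hne : cols.filter (fun c => pvCanon c == pat) ≠ [] := by
          obtain ⟨c, hc1, hc2⟩ := hex
          intro hnil
          have := List.filter_eq_nil_iff.mp hnil c hc1
          simp [hc2] at this
        obtain ⟨m, hm⟩ : ∃ m, PySem.List.min? (cols.filter (fun c => pvCanon c == pat))
            (fun x => toLex (PySem.Str.len x, x)) = some m := by
          cases h : PySem.List.min? (cols.filter (fun c => pvCanon c == pat))
              (fun x => toLex (PySem.Str.len x, x)) with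
          | none => exact absurd ((PySem.List.min?_eq_none_iff _ _).mp h) hne
          | some m => exact ⟨m, rfl⟩
        have hmmem := PySem.List.min?_mem hm
        have hmmin := PySem.List.min?_isMin hm
        have hm1 : m ∈ cols := (List.mem_filter.mp hmmem).1
        have hm2 : (pvCanon m == pat) = true := (List.mem_filter.mp hmmem).2
        have hminl : pvMinList (cols.filterMap (fun c => pvFirstHit c (pvCanon c) ((prio, false, pat) :: rest)))
            = some (prio, PySem.Str.len m, m) := by
          apply pv_minlist_eq_some
          · apply List.mem_filterMap.mpr
            exact ⟨m, hm1, by simp [pvFirstHit, hm2]⟩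
          · intro x hx
            obtain ⟨c, hcmem, hc⟩ := List.mem_filterMap.mp hx
            simp only [pvFirstHit, Bool.false_eq_true, if_false] at hc
            by_cases hcp : (pvCanon c == pat) = true
            · rw [if_pos hcp] at hc
              cases hc
              have hcf : c ∈ cols.filter (fun c => pvCanon c == pat) :=
                List.mem_filter.mpr ⟨hcmem, hcp⟩
              have hle := hmmin c hcf
              unfold pvTripKey
              exact Prod.Lex.toLex_le_toLex.mpr (Or.inr ⟨rfl, hle⟩)
            · rw [if_neg (by simp_all)] at hc
              have := hgt c x hc
              exact le_of_lt ((pv_tripLt_iff _ _).mp (by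
                unfold pvTripLt
                simp [this]))
        rw [hminl]
        simp only [pvCascade, hm]
        rfl
      · have hnone : PySem.List.min? (cols.filter (fun c => pvCanon c == pat))
            (fun x => toLex (PySem.Str.len x, x)) = none := by
          have : cols.filter (fun c => pvCanon c == pat) = [] := by
            apply List.filter_eq_nil_iff.mpr
            intro c hc hcp
            exact hex ⟨c, hc, hcp⟩
          rw [this]
          exact (PySem.List.min?_eq_none_iff _ _).mpr rfl
        have hcongr : cols.filterMap (fun c => pvFirstHit c (pvCanon c) ((prio, false, pat) :: rest))
            = cols.filterMap (fun c => pvFirstHit c (pvCanon c) rest) := by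
          apply List.filterMap_congr
          intro c hc
          have : (pvCanon c == pat) = false := by
            rw [Bool.eq_false_iff]
            intro hcp
            exact hex ⟨c, hc, hcp⟩
          simp [pvFirstHit, this]
        rw [hcongr]
        simp only [pvCascade, hnone]
        exact ih cols hrest

-- priorities along B's pattern lists are strictly increasing: the counter only moves up
theorem pv_pats_counter (aliases : List String) :
    ∀ (p : Int) (init : List (Int × Bool × String)),
    (init.map (fun q => q.1)).Pairwise (· < ·) →
    (∀ x ∈ init.map (fun q => q.1), x < p) →
    (((aliases.foldl
        (fun (acc : Int × List (Int × Bool × String)) a =>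
          (acc.1 + 2, acc.2 ++ [(acc.1, true, pvNormalize a), (acc.1 + 1, false, pvCanon (pvNormalize a))]))
        (p, init)).2).map (fun q => q.1)).Pairwise (· < ·) := by
  induction aliases with
  | nil => intro p init hpw _; exact hpw
  | cons a rest ih =>
    intro p init hpw hbound
    simp only [List.foldl_cons]
    apply ih
    · rw [List.map_append, List.pairwise_append]
      refine ⟨hpw, by simp, ?_⟩
      intro x hx y hy
      simp only [List.map_cons, List.map_nil, List.mem_cons, List.not_mem_nil, or_false] at hy
      rcases hy with rfl | rfl
      · exact hbound x hx
      · exact lt_trans (hbound x hx) (by omega)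
    · intro x hx
      rw [List.map_append, List.mem_append] at hx
      rcases hx with hx | hx
      · exact lt_trans (hbound x hx) (by omega)
      · simp only [List.map_cons, List.map_nil, List.mem_cons, List.not_mem_nil, or_false] at hx
        rcases hx with rfl | rfl <;> omega

theorem pv_pats_pairwise (l : String) :
    ((pvPatsB l).map (fun q => q.1)).Pairwise (· < ·) := by
  unfold pvPatsB
  apply pv_pats_counter
  · simp
  · intro x hx
    simp only [List.map_cons, List.map_nil, List.mem_cons, List.not_mem_nil, or_false] at hx
    rcases hx with rfl | rfl <;> omega

-- the column-major fold, pushed through the state list to one fold per field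
theorem pv_foldl_map {E : Type} (g : String → E → E) :
    ∀ (cols : List String) (st : List E),
    cols.foldl (fun st c => st.map (g c)) st = st.map (fun e => cols.foldl (fun e c => g c e) e) := by
  intro cols
  induction cols with
  | nil => intro st; simp
  | cons c rest ih =>
    intro st
    simp only [List.foldl_cons, ih, List.map_map]
    rfl

theorem pv_per_elem (cols : List String) (l : String) (pats : List (Int × Bool × String)) :
    ∀ (cur : Option (Int × Int × String)),
    cols.foldl (fun (e : String × List (Int × Bool × String) × Option (Int × Int × String)) c =>
        (e.1, e.2.1, pvBetter e.2.2 (pvFirstHit c (pvCanon c) e.2.1))) (l, pats, cur)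
      = (l, pats, cols.foldl (fun cur c => pvBetter cur (pvFirstHit c (pvCanon c) pats)) cur) := by
  induction cols with
  | nil => intro cur; rfl
  | cons c rest ih => intro cur; simp only [List.foldl_cons]; exact ih _

-- ===== VERDICT (by name: the statement is the Claim_ definition above) =====
theorem match_logical_fields_py_spec : Claim_equal_match_logical_fields_py := by
  intro cols _
  unfold Spec_match_logical_fields_py match_logical_fields_py match_logical_fields_py_alt
  simp only
  rw [pv_foldl_map, List.map_map]
  have hmap : (pvLogicalRequired.map
      ((fun e => cols.foldl (fun e c => (e.1, e.2.1, pvBetter e.2.2 (pvFirstHit c (pvCanon c) e.2.1))) e)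
        ∘ (fun l => (l, pvPatsB l, (none : Option (Int × Int × String))))))
      = pvLogicalRequired.map (fun l => (l, pvPatsB l,
          cols.foldl (fun cur c => pvBetter cur (pvFirstHit c (pvCanon c) (pvPatsB l))) none)) := by
    apply List.map_congr_left
    intro l _
    exact pv_per_elem cols l (pvPatsB l) none
  rw [hmap, List.foldl_map]
  congr 1
  apply PySem.List.foldl_congr_mem
  intro m l hl
  rw [pv_stepA_cascade cols m l]
  have hcascade :
      (cols.foldl (fun cur c => pvBetter cur (pvFirstHit c (pvCanon c) (pvPatsB l))) none).map (fun t => t.2.2)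
        = pvCascade cols (pvDrop (pvPatsB l)) := by
    rw [pv_fold_better]
    exact pv_min_cascade (pvPatsB l) cols (pv_pats_pairwise l)
  cases hfold : cols.foldl (fun cur c => pvBetter cur (pvFirstHit c (pvCanon c) (pvPatsB l))) none with
  | none =>
    rw [hfold] at hcascade
    simp only [Option.map_none] at hcascade
    rw [← hcascade]
  | some t =>
    rw [hfold] at hcascade
    simp only [Option.map_some] at hcascade
    rw [← hcascade]
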